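-- pv_equiv track=rewrite | github.com/nnamnielk/oliver-kleinmann-scripts | scheduling/sched.py | get_event_color
-- ===== SOURCE A (Python) =====
-- COLORS = {
--     "purple": "\033[95m",
--     "brown": "\033[33m",
--     "maroon": "\033[31m",
--     "blue": "\033[94m",
--     "red": "\033[91m",
--     "green": "\033[92m",
--     "reset": "\033[0m"
-- }
--
-- def get_event_color(event):
--     """
--     Returns the appropriate color for the event.
--     """
--     event_lower = event.lower()
--     if "study session" in event_lower or "final review" in event_lower:
--         return COLORS["purple"]
--     elif "plan the day" in event_lower:
--         return COLORS["brown"]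
--     elif "workout" in event_lower:
--         return COLORS["maroon"]
--     elif "nap" in event_lower:
--         return COLORS["green"]
--     elif any(keyword in event_lower for keyword in ["wake up", "morning routine", "lunch", "dinner"]):
--         return COLORS["blue"]
--     else:
--         return COLORS["red"]
-- ===== SOURCE B (Python) =====
-- COLORS = {
--     "purple": "\033[95m",
--     "brown": "\033[33m",
--     "maroon": "\033[31m",
--     "blue": "\033[94m",
--     "red": "\033[91m",
--     "green": "\033[92m",
--     "reset": "\033[0m"
-- }
--
-- # Flat keyword -> priority index; the winning category is the MINIMUM priority
-- # among all matched keywords (no short-circuit: all keywords are tested).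
-- _KEYWORD_PRIORITY = [
--     ("study session", 0), ("final review", 0),
--     ("plan the day", 1),
--     ("workout", 2),
--     ("nap", 3),
--     ("wake up", 4), ("morning routine", 4), ("lunch", 4), ("dinner", 4),
-- ]
-- _PRIORITY_COLORS = ["purple", "brown", "maroon", "green", "blue", "red"]
--
-- def get_event_color(event):
--     event_lower = event.lower()
--     best = min((p for k, p in _KEYWORD_PRIORITY if k in event_lower), default=5)
--     return COLORS[_PRIORITY_COLORS[best]]
-- ===== Notes on version B (the rewrite author's own statement) =====
-- stated objective: alternative
-- what changed: Instead of an ordered if-elif chain with short-circuit priority, B tests every keyword against the lowered event, collects the priority index of each matched keyword, and returns the color of the minimum matched priority (default red); correctness holds because the chain's branch order equals the priority order.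
import Mathlib
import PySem

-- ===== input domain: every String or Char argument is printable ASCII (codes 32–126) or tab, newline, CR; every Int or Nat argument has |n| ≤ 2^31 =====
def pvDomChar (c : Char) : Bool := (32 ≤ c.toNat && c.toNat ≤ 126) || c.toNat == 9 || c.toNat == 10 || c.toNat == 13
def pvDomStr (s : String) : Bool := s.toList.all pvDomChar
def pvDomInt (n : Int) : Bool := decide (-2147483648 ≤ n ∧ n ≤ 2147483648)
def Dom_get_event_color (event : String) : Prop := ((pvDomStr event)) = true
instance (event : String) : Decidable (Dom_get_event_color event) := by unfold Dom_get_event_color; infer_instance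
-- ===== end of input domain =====

-- B replaces A's short-circuiting if-elif chain by "match all keywords, take the minimum priority" (alternative decomposition; same cost).

-- The module constant COLORS (a Python dict), shared by both ports.
def pvCOLORS : PySem.Dict String String :=
  PySem.Dict.ofList
    [("purple", "\x1b[95m"), ("brown", "\x1b[33m"), ("maroon", "\x1b[31m"),
     ("blue", "\x1b[94m"), ("red", "\x1b[91m"), ("green", "\x1b[92m"), ("reset", "\x1b[0m")]

-- COLORS[k]: all keys used are literally present, so the KeyError case is unreachable; .getD "" is that dead branch.
def pvColorAt (k : String) : String := (PySem.Dict.get? pvCOLORS k).getD ""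

-- ===== PORT A =====
def get_event_color (event : String) : String :=
  let event_lower := PySem.Str.lower event
  if PySem.Str.isIn "study session" event_lower || PySem.Str.isIn "final review" event_lower then
    pvColorAt "purple"
  else if PySem.Str.isIn "plan the day" event_lower then
    pvColorAt "brown"
  else if PySem.Str.isIn "workout" event_lower then
    pvColorAt "maroon"
  else if PySem.Str.isIn "nap" event_lower then
    pvColorAt "green"
  else if (["wake up", "morning routine", "lunch", "dinner"].any fun keyword => PySem.Str.isIn keyword event_lower) then
    pvColorAt "blue"
  else
    pvColorAt "red"

-- ===== PORT B =====
-- the module constants _KEYWORD_PRIORITY and _PRIORITY_COLORS of Source B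
def pvKEYWORD_PRIORITY : List (String × Int) :=
  [("study session", 0), ("final review", 0),
   ("plan the day", 1),
   ("workout", 2),
   ("nap", 3),
   ("wake up", 4), ("morning routine", 4), ("lunch", 4), ("dinner", 4)]

def pvPRIORITY_COLORS : List String := ["purple", "brown", "maroon", "green", "blue", "red"]

def get_event_color_alt (event : String) : String :=
  let event_lower := PySem.Str.lower event
  -- min((p for k, p in _KEYWORD_PRIORITY if k in event_lower), default=5)
  let best : Int :=
    (PySem.List.min?
      (pvKEYWORD_PRIORITY.filterMap
        (fun kp => if PySem.Str.isIn kp.1 event_lower then some kp.2 else none))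
      (fun p => p)).getD 5
  -- _PRIORITY_COLORS[best]: best ∈ [0,5] always, so the IndexError branch (.getD "") is dead
  pvColorAt ((PySem.List.pyGet? pvPRIORITY_COLORS best).getD "")

-- ===== PRECONDITION & SPEC =====
def Spec_get_event_color (event : String) (out : String) : Prop := out = get_event_color_alt event
instance (event : String) (out : String) : Decidable (Spec_get_event_color event out) := by unfold Spec_get_event_color; infer_instance

-- ===== CLAIM (what is proved, stated in full; the proofs are below) =====
def Claim_equal_get_event_color : Prop := ∀ (event : String), Dom_get_event_color event → Spec_get_event_color event (get_event_color event)

-- ===== LEMMAS AND PROOFS =====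

-- ===== VERDICT =====
theorem get_event_color_spec : Claim_equal_get_event_color := by
  intro event _
  show get_event_color event = get_event_color_alt event
  simp only [get_event_color, get_event_color_alt, pvKEYWORD_PRIORITY, pvPRIORITY_COLORS,
    List.any_cons, List.any_nil, List.filterMap_cons, List.filterMap_nil, Bool.or_false]
  generalize PySem.Str.isIn "study session" (PySem.Str.lower event) = b1
  generalize PySem.Str.isIn "final review" (PySem.Str.lower event) = b2
  generalize PySem.Str.isIn "plan the day" (PySem.Str.lower event) = b3
  generalize PySem.Str.isIn "workout" (PySem.Str.lower event) = b4
  generalize PySem.Str.isIn "nap" (PySem.Str.lower event) = b5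
  generalize PySem.Str.isIn "wake up" (PySem.Str.lower event) = b6
  generalize PySem.Str.isIn "morning routine" (PySem.Str.lower event) = b7
  generalize PySem.Str.isIn "lunch" (PySem.Str.lower event) = b8
  generalize PySem.Str.isIn "dinner" (PySem.Str.lower event) = b9
  revert b1 b2 b3 b4 b5 b6 b7 b8 b9
  decide
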